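-- pv_equiv track=rewrite | github.com/Kroilov/py_edu | practice_03/task_05.py | fiba
-- ===== SOURCE A (Python) =====
-- def fiba(n):
--     fiba_list = []
--     a = 1
--     b = 1
--     for i in range(n):
--         fiba_list.append(a)
--         s = a + b
--         a = b
--         b = s
--
--     a = 0
--     b = 1
--     for i in range(n + 1):
--         fiba_list.insert(0, a)
--         s = a - b
--         a = b
--         b = s
--     return fiba_list
-- ===== SOURCE B (Python) =====
-- def fiba(n):
--     # negafibonacci..fibonacci via a forward table and one mapping pass:
--     # F(-k) = (-1)**(k+1) * F(k)
--     m = n if n > 0 else 0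
--     fib = [0, 1]
--     for i in range(2, m + 1):
--         fib.append(fib[i - 1] + fib[i - 2])
--     return [fib[k] if k >= 0 else (-1) ** (-k + 1) * fib[-k] for k in range(-n, n + 1)]
-- ===== Notes on version B (the rewrite author's own statement) =====
-- stated objective: faster
-- what changed: Replaces A's two accumulating loops (append forward, repeated insert(0) backward, which is quadratic) by one forward Fibonacci table and a single mapping pass over range(-n, n+1) using the negafibonacci identity F(-k) = (-1)**(k+1)*F(k).
import Mathlib
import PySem

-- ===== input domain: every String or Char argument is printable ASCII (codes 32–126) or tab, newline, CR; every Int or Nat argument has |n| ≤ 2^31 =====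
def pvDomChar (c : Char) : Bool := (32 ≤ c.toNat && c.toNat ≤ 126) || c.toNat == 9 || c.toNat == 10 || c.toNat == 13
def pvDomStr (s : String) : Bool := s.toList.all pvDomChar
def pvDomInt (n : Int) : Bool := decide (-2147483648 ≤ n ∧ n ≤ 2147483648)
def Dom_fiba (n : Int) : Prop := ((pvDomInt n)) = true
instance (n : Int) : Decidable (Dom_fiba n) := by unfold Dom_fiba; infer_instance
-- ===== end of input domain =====

-- B replaces A's two accumulating loops (with repeated insert(0)) by a forward Fibonacci
-- table plus one mapping pass over range(-n, n+1) using F(-k) = (-1)^(k+1)·F(k)  (objective: alternative).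

-- ===== PORT A =====
def fiba (n : Int) : List Int :=
  let s1 := (PySem.List.pyRange 0 n 1).foldl
    (fun (st : List Int × Int × Int) _ =>
      let (l, a, b) := st
      (l ++ [a], b, a + b)) ([], 1, 1)
  let s2 := (PySem.List.pyRange 0 (n + 1) 1).foldl
    (fun (st : List Int × Int × Int) _ =>
      let (l, a, b) := st
      (a :: l, b, a - b)) (s1.1, 0, 1)
  s2.1

-- ===== PORT B =====
-- indexing note: every fib[·] access in Source B is in range (table length ≥ 2, indices ≤ m),
-- so `(pyGet? …).getD 0` is exact there.
def fiba_alt (n : Int) : List Int :=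
  let m : Int := if n > 0 then n else 0
  let fib := (PySem.List.pyRange 2 (m + 1) 1).foldl
    (fun (t : List Int) i =>
      t ++ [(PySem.List.pyGet? t (i - 1)).getD 0 + (PySem.List.pyGet? t (i - 2)).getD 0])
    [0, 1]
  (PySem.List.pyRange (-n) (n + 1) 1).map
    (fun k => if k ≥ 0 then (PySem.List.pyGet? fib k).getD 0
              else (-1 : Int) ^ (-k + 1).toNat * (PySem.List.pyGet? fib (-k)).getD 0)

-- ===== PRECONDITION & SPEC =====
def Spec_fiba (n : Int) (out : List Int) : Prop := out = fiba_alt n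
instance (n : Int) (out : List Int) : Decidable (Spec_fiba n out) := by unfold Spec_fiba; infer_instance

-- ===== CLAIM (what is proved, stated in full; the proofs are below) =====
def Claim_equal_fiba : Prop := ∀ (n : Int), Dom_fiba n → Spec_fiba n (fiba n)

-- ===== LEMMAS AND PROOFS =====

/-- Standard Fibonacci over Int. -/
def fibI : Nat → Int
  | 0 => 0
  | 1 => 1
  | n + 2 => fibI n + fibI (n + 1)

/-- Negafibonacci: gI i = F(-i) = (-1)^(i+1)·F(i). -/
def gI (i : Nat) : Int := (-1 : Int) ^ (i + 1) * fibI i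

theorem fibI_add2 (n : Nat) : fibI (n + 2) = fibI n + fibI (n + 1) := by rw [fibI]

theorem gI_rec (j : Nat) : gI j - gI (j + 1) = gI (j + 2) := by
  simp [gI, fibI, pow_succ]; ring

/-- The list A's first loop appends, as a function of the two seeds. -/
def seqF : Int → Int → Nat → List Int
  | _, _, 0 => []
  | a, b, k + 1 => a :: seqF b (a + b) k

/-- A's first loop's final (a, b). -/
def itF : Int → Int → Nat → Int × Int
  | a, b, 0 => (a, b)
  | a, b, k + 1 => itF b (a + b) k

/-- The list A's second loop prepends, as a function of the two seeds. -/
def seqG : Int → Int → Nat → List Int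
  | _, _, 0 => []
  | a, b, k + 1 => a :: seqG b (a - b) k

/-- A's second loop's final (a, b). -/
def itG : Int → Int → Nat → Int × Int
  | a, b, 0 => (a, b)
  | a, b, k + 1 => itG b (a - b) k

theorem loop1 (l : List Int) : ∀ (acc : List Int) (a b : Int),
    l.foldl (fun (st : List Int × Int × Int) _ =>
        let (l, a, b) := st
        (l ++ [a], b, a + b)) (acc, a, b)
      = (acc ++ seqF a b l.length, itF a b l.length) := by
  induction l with
  | nil => intro acc a b; simp [seqF, itF]
  | cons x xs ih =>
    intro acc a b
    simp only [List.foldl_cons, List.length_cons, seqF, itF]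
    rw [ih]
    simp

theorem loop2 (l : List Int) : ∀ (acc : List Int) (a b : Int),
    l.foldl (fun (st : List Int × Int × Int) _ =>
        let (l, a, b) := st
        (a :: l, b, a - b)) (acc, a, b)
      = ((seqG a b l.length).reverse ++ acc, itG a b l.length) := by
  induction l with
  | nil => intro acc a b; simp [seqG, itG]
  | cons x xs ih =>
    intro acc a b
    simp only [List.foldl_cons, List.length_cons, seqG, itG]
    rw [ih]
    simp

theorem fibI_rec (j : Nat) : fibI (j + 1) + fibI (j + 2) = fibI (j + 3) :=
  (fibI_add2 (j + 1)).symm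

theorem seqF_fib : ∀ (m j : Nat),
    seqF (fibI (j + 1)) (fibI (j + 2)) m = (List.range m).map (fun i => fibI (j + 1 + i))
  | 0, _ => rfl
  | m + 1, j => by
    rw [seqF, fibI_rec,
        show fibI (j + 2) = fibI ((j + 1) + 1) from rfl,
        show fibI (j + 3) = fibI ((j + 1) + 2) from rfl,
        seqF_fib m (j + 1), List.range_succ_eq_map]
    simp only [List.map_cons, List.map_map, Function.comp_def]
    congr 1
    apply List.map_congr_left; intro i _; congr 1; omega

theorem seqG_g : ∀ (m j : Nat),
    seqG (gI j) (gI (j + 1)) m = (List.range m).map (fun i => gI (j + i))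
  | 0, _ => rfl
  | m + 1, j => by
    rw [seqG, gI_rec,
        show gI (j + 1) = gI ((j + 1)) from rfl,
        show gI (j + 2) = gI ((j + 1) + 1) from rfl,
        seqG_g m (j + 1), List.range_succ_eq_map]
    simp only [List.map_cons, List.map_map, Function.comp_def]
    congr 1
    apply List.map_congr_left; intro i _; congr 1; omega

/-- B's table loop, from a correct table of length j ≥ 2, extends it to length j + d. -/
theorem tabLoop : ∀ (d j : Nat), 2 ≤ j →
    (PySem.List.pyRange (j : Int) ((j : Int) + (d : Int)) 1).foldl
      (fun (t : List Int) i =>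
        t ++ [(PySem.List.pyGet? t (i - 1)).getD 0 + (PySem.List.pyGet? t (i - 2)).getD 0])
      ((List.range j).map fibI)
    = (List.range (j + d)).map fibI
  | 0, j, _ => by
    rw [PySem.List.pyRange_one_eq_nil (by omega)]; simp
  | d + 1, j, hj => by
    rw [PySem.List.pyRange_one_cons (by push_cast; omega)]
    simp only [List.foldl_cons]
    have h1 : (j : Int) - 1 = ((j - 1 : Nat) : Int) := by omega
    have h2 : (j : Int) - 2 = ((j - 2 : Nat) : Int) := by omega
    have e1 : (PySem.List.pyGet? ((List.range j).map fibI) ((j : Int) - 1)).getD 0 = fibI (j - 1) := by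
      rw [h1, PySem.List.pyGet?_natCast]
      simp [List.getElem?_map, List.getElem?_range (by omega : j - 1 < j)]
    have e2 : (PySem.List.pyGet? ((List.range j).map fibI) ((j : Int) - 2)).getD 0 = fibI (j - 2) := by
      rw [h2, PySem.List.pyGet?_natCast]
      simp [List.getElem?_map, List.getElem?_range (by omega : j - 2 < j)]
    rw [e1, e2,
        show fibI (j - 1) + fibI (j - 2) = fibI j from by
          rw [show j = (j - 2) + 2 from by omega, fibI_add2]
          rw [show (j - 2) + 2 - 1 = (j - 2) + 1 from by omega,
              show (j - 2) + 2 - 2 = j - 2 from by omega]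
          ring,
        show (List.range j).map fibI ++ [fibI j] = (List.range (j + 1)).map fibI from by
          rw [List.range_succ]; simp]
    have := tabLoop d (j + 1) (by omega)
    rw [show ((j : Int) + 1) = ((j + 1 : Nat) : Int) from by push_cast; ring,
        show (j : Int) + ((d : Nat) + 1 : Nat) = ((j + 1 : Nat) : Int) + (d : Nat) from by push_cast; ring] at *
    rw [this, show j + 1 + d = j + (d + 1) from by omega]

/-- Reversing a mapped range peels off index 0 at the back. -/
theorem rev_map_range (g : Nat → Int) : ∀ (m : Nat),
    ((List.range (m + 1)).map g).reverse = (List.range m).map (fun k => g (m - k)) ++ [g 0]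
  | 0 => rfl
  | m + 1 => by
    rw [List.range_succ, List.map_append, List.reverse_append, rev_map_range g m,
        List.range_succ_eq_map]
    simp only [List.map_cons, List.map_map, List.map_nil, List.reverse_cons, List.reverse_nil,
      Function.comp_def, List.nil_append, List.cons_append]
    congr 1
    congr 1
    apply List.map_congr_left; intro i _; congr 1; omega

theorem seqF_one_one (M : Nat) :
    seqF 1 1 M = (List.range M).map (fun i => fibI (i + 1)) := by
  have h := seqF_fib M 0
  rw [show fibI (0 + 1) = 1 from rfl, show fibI (0 + 2) = 1 from by decide] at h
  rw [h]
  apply List.map_congr_left; intro i _; congr 1; omega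

theorem seqG_zero_one (M : Nat) :
    seqG 0 1 M = (List.range M).map gI := by
  have h := seqG_g M 0
  rw [show gI 0 = 0 from by decide, show gI (0 + 1) = 1 from by decide] at h
  rw [h]
  apply List.map_congr_left; intro i _; congr 1; omega

/-- A's value, in closed form (n ≥ 0, M = n.toNat). -/
theorem fiba_closed (n : Int) (hn : 0 ≤ n) :
    fiba n = ((List.range (n.toNat + 1)).map gI).reverse
              ++ (List.range n.toNat).map (fun i => fibI (i + 1)) := by
  simp only [fiba]
  rw [loop1, loop2]
  simp only [PySem.List.length_pyRange_one, List.nil_append]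
  rw [show (n - 0).toNat = n.toNat from by omega,
      show (n + 1 - 0).toNat = n.toNat + 1 from by omega,
      seqF_one_one, seqG_zero_one]

/-- B's Fibonacci table, in closed form (M = m.toNat). -/
theorem table_closed (M : Nat) :
    (PySem.List.pyRange 2 ((M : Int) + 1) 1).foldl
      (fun (t : List Int) i =>
        t ++ [(PySem.List.pyGet? t (i - 1)).getD 0 + (PySem.List.pyGet? t (i - 2)).getD 0])
      [0, 1]
    = (List.range (max (M + 1) 2)).map fibI := by
  rcases Nat.eq_zero_or_pos M with h0 | h1
  · subst h0
    rw [PySem.List.pyRange_one_eq_nil (by omega)]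
    decide
  · have h := tabLoop (M - 1) 2 (by omega)
    rw [show ((2 : Nat) : Int) + ((M - 1 : Nat) : Int) = (M : Int) + 1 from by omega,
        show ((2 : Nat) : Int) = (2 : Int) from by norm_num,
        show (List.range 2).map fibI = [0, 1] from by decide,
        show 2 + (M - 1) = max (M + 1) 2 from by omega] at h
    exact h

/-- B's value, in closed form (n ≥ 0, M = n.toNat). -/
theorem fiba_alt_closed (n : Int) (hn : 0 ≤ n) :
    fiba_alt n = (List.range n.toNat).map (fun k => gI (n.toNat - k))
                  ++ (List.range (n.toNat + 1)).map fibI := by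
  have hL : ∀ i : Nat, i ≤ n.toNat →
      (PySem.List.pyGet? ((List.range (max (n.toNat + 1) 2)).map fibI) ((i : Nat) : Int)).getD 0
        = fibI i := by
    intro i hi
    rw [PySem.List.pyGet?_natCast]
    simp [List.getElem?_map, List.getElem?_range (by omega : i < max (n.toNat + 1) 2)]
  simp only [fiba_alt]
  rw [show (if n > 0 then n else 0) = ((n.toNat : Nat) : Int) from by split_ifs <;> omega,
      table_closed n.toNat,
      PySem.List.pyRange_one_append (-n) 0 (n + 1) (by omega) (by omega),
      List.map_append]
  congr 1
  · -- negative half of the range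
    rw [PySem.List.pyRange_one, show ((0 : Int) - -n).toNat = n.toNat from by omega,
        List.map_map]
    apply List.map_congr_left
    intro k hk
    rw [List.mem_range] at hk
    have hneg : ¬ (-n + (k : Int) ≥ 0) := by omega
    simp only [Function.comp_def, if_neg hneg]
    rw [show -(-n + (k : Int)) = ((n.toNat - k : Nat) : Int) from by omega, hL _ (by omega),
        show (((n.toNat - k : Nat) : Int) + 1).toNat = (n.toNat - k) + 1 from by omega]
    rfl
  · -- nonnegative half of the range
    rw [PySem.List.pyRange_one, show (n + 1 - 0).toNat = n.toNat + 1 from by omega,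
        List.map_map]
    apply List.map_congr_left
    intro k hk
    rw [List.mem_range] at hk
    have hpos : (0 : Int) + (k : Int) ≥ 0 := by omega
    simp only [Function.comp_def, if_pos hpos]
    rw [show (0 : Int) + (k : Int) = ((k : Nat) : Int) from by omega, hL _ (by omega)]

-- ===== VERDICT (by name: the statement is the Claim_ definition above) =====
theorem fiba_spec : Claim_equal_fiba := by
  intro n _
  unfold Spec_fiba
  by_cases hn : 0 ≤ n
  · rw [fiba_closed n hn, fiba_alt_closed n hn, rev_map_range gI n.toNat,
        List.range_succ_eq_map (n := n.toNat), List.append_assoc]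
    congr 1
    simp only [List.map_cons, List.map_map, Function.comp_def, List.cons_append,
      List.nil_append]
    rw [show gI 0 = fibI 0 from by decide]
  · have h1 : PySem.List.pyRange 0 n 1 = [] := PySem.List.pyRange_one_eq_nil (by omega)
    have h2 : PySem.List.pyRange 0 (n + 1) 1 = [] := PySem.List.pyRange_one_eq_nil (by omega)
    have h3 : PySem.List.pyRange (-n) (n + 1) 1 = [] := PySem.List.pyRange_one_eq_nil (by omega)
    have hm : (if n > 0 then n else 0) = (0 : Int) := by split_ifs <;> omega
    simp [fiba, fiba_alt, h1, h2, h3, hm]
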